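-- pv_equiv track=rewrite | github.com/awilkins/advent | advent/day_05/nice.py | contains_double_couplet
-- ===== SOURCE A (Python) =====
-- from itertools import pairwise
--
-- def contains_double_couplet(line: str):
--     couplets = set(
--         ''.join(pair) for pair in pairwise(line)
--     )
--     for couplet in couplets:
--         c_index = line.index(couplet)
--         if couplet in line[c_index + 2:]:
--             return True
--     return False
-- ===== SOURCE B (Python) =====
-- def contains_double_couplet(line: str):
--     # single pass: remember the first index of each adjacent pair; a repeat
--     # with gap >= 2 means a non-overlapping second occurrence exists
--     first = {}
--     for i, pair in enumerate(zip(line, line[1:])):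
--         if pair in first:
--             if i - first[pair] >= 2:
--                 return True
--         else:
--             first[pair] = i
--     return False
-- ===== Notes on version B (the rewrite author's own statement) =====
-- stated objective: faster
-- what changed: Replaced the build-a-set-then-rescan approach (str.index and substring search over the whole line for every distinct couplet) by a single left-to-right pass that records the first index of each adjacent pair in a dict and reports a repeat as soon as the current index is at least 2 past that first index.
import Mathlib
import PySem

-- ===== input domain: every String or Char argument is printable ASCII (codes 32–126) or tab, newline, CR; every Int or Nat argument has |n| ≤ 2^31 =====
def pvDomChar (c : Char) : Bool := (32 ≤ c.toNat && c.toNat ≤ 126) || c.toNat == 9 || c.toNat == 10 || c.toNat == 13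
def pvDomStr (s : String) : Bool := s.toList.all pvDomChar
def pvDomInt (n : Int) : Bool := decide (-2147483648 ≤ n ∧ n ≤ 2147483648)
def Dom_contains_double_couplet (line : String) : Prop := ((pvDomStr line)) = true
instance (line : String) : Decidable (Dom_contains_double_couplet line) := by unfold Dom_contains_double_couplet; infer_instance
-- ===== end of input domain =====

-- B replaces A's per-couplet rescans of the line (str.index + substring search) by one
-- left-to-right pass keeping each adjacent pair's first index in a dict (objective: faster).

-- ===== PORT A =====
-- couplets = set(''.join(pair) for pair in pairwise(line)); for each couplet check it
-- reappears at or after its first index + 2.  The for-loop over the set returns True on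
-- the first hit and False otherwise, so the result does not depend on the (unmodelled)
-- set iteration order; it is ported as .any over the Set's element list.
def contains_double_couplet (line : String) : Bool :=
  let couplets : PySem.Set String :=
    PySem.Set.ofList ((line.toList.zip line.toList.tail).map
      (fun p => String.ofList [p.1, p.2]))
  couplets.any (fun couplet =>
    let cIndex := PySem.Str.find line couplet
    PySem.Str.isIn couplet (PySem.Str.slice line (some (cIndex + 2)) none))


-- ===== PORT B =====
-- the loop of Source B: first index of each adjacent pair in a dict; a repeat at distance >= 2 wins
def pvBLoop (pairs : List (Char × Char)) (i : Int)
    (first : PySem.Dict (Char × Char) Int) : Bool :=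
  match pairs with
  | [] => false
  | p :: rest =>
    match first.get? p with
    | some j => if 2 ≤ i - j then true else pvBLoop rest (i + 1) first
    | none => pvBLoop rest (i + 1) (first.insert p i)

def contains_double_couplet_alt (line : String) : Bool :=
  pvBLoop (line.toList.zip line.toList.tail) 0 PySem.Dict.empty


-- ===== PRECONDITION & SPEC =====
def Spec_contains_double_couplet (line : String) (out : Bool) : Prop := out = contains_double_couplet_alt line
instance (line : String) (out : Bool) : Decidable (Spec_contains_double_couplet line out) := by unfold Spec_contains_double_couplet; infer_instance

-- ===== CLAIM (what is proved, stated in full; the proofs are below) =====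
def Claim_equal_contains_double_couplet : Prop := ∀ (line : String), Dom_contains_double_couplet line → Spec_contains_double_couplet line (contains_double_couplet line)

-- ===== LEMMAS AND PROOFS =====

-- common characterisation: some adjacent pair occurs at two positions at distance ≥ 2
def pvHasRep (cs : List Char) : Prop :=
  ∃ a b p, a + 2 ≤ b ∧ (cs.zip cs.tail)[a]? = some p ∧ (cs.zip cs.tail)[b]? = some p


lemma pv_two_prefix (a b : Char) (t : List Char) :
    [a, b] <+: t ↔ t[0]? = some a ∧ t[1]? = some b := by
  cases t with
  | nil => simp
  | cons x t => cases t <;> simp [List.cons_prefix_iff]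

lemma pv_pair_at (cs : List Char) (i : Nat) (a b : Char) :
    [a, b] <+: cs.drop i ↔ (cs.zip cs.tail)[i]? = some (a, b) := by
  rw [pv_two_prefix]
  simp only [List.getElem?_zip_eq_some, List.getElem?_tail, List.getElem?_drop, Nat.add_zero]

lemma pv_A_iff (line : String) :
    contains_double_couplet line = true ↔ pvHasRep line.toList := by
  unfold contains_double_couplet
  simp only [List.any_eq_true]
  constructor
  · rintro ⟨c, hc, hf⟩
    have hc' := (PySem.Set.mem_ofList _ _).mp hc
    obtain ⟨⟨a, b⟩, hp, rfl⟩ := List.mem_map.mp hc'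
    obtain ⟨i, hPi⟩ := List.mem_iff_getElem?.mp hp
    have hpre : [a, b] <+: line.toList.drop i := (pv_pair_at _ _ _ _).mpr hPi
    have hinf : [a, b] <:+: line.toList := hpre.isInfix.trans ((line.toList.drop_suffix i).isInfix)
    simp only [PySem.Str.isIn_eq, PySem.Str.find_eq, PySem.Str.toList_slice,
      String.toList_ofList, PySem.Chars.slice_eq_listSlice] at hf
    have hF0 : 0 ≤ PySem.Chars.find line.toList [a, b] :=
      (PySem.Chars.find_nonneg_iff _ _).mpr hinf
    set F := PySem.Chars.find line.toList [a, b] with hFdef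
    rw [PySem.List.slice_from _ (by omega)] at hf
    have hFn : (F + 2).toNat = F.toNat + 2 := by omega
    rw [hFn] at hf
    obtain ⟨j, hj⟩ := (PySem.Chars.exists_prefix_drop_iff_isIn _ _).mpr hf
    rw [List.drop_drop] at hj
    obtain ⟨hfst, -⟩ := PySem.Chars.find_spec hF0
    exact ⟨F.toNat, F.toNat + 2 + j, (a, b), by omega,
      (pv_pair_at _ _ _ _).mp hfst, (pv_pair_at _ _ _ _).mp hj⟩
  · rintro ⟨a0, b0, ⟨a, b⟩, hab, hA, hB⟩
    refine ⟨String.ofList [a, b], ?_, ?_⟩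
    · exact (PySem.Set.mem_ofList _ _).mpr
        (List.mem_map.mpr ⟨(a, b), List.mem_iff_getElem?.mpr ⟨a0, hA⟩, rfl⟩)
    · have hpreA : [a, b] <+: line.toList.drop a0 := (pv_pair_at _ _ _ _).mpr hA
      have hpreB : [a, b] <+: line.toList.drop b0 := (pv_pair_at _ _ _ _).mpr hB
      have hinf : [a, b] <:+: line.toList :=
        hpreA.isInfix.trans ((line.toList.drop_suffix a0).isInfix)
      simp only [PySem.Str.isIn_eq, PySem.Str.find_eq, PySem.Str.toList_slice,
        String.toList_ofList, PySem.Chars.slice_eq_listSlice]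
      have hF0 : 0 ≤ PySem.Chars.find line.toList [a, b] :=
        (PySem.Chars.find_nonneg_iff _ _).mpr hinf
      set F := PySem.Chars.find line.toList [a, b] with hFdef
      obtain ⟨-, hmin⟩ := PySem.Chars.find_spec hF0
      have hle : F.toNat ≤ a0 := by
        by_contra h
        exact hmin a0 (by omega) hpreA
      rw [PySem.List.slice_from _ (by omega)]
      have hFn : (F + 2).toNat = F.toNat + 2 := by omega
      rw [hFn]
      refine (PySem.Chars.exists_prefix_drop_iff_isIn _ _).mp ⟨b0 - (F.toNat + 2), ?_⟩
      rw [List.drop_drop]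
      have : F.toNat + 2 + (b0 - (F.toNat + 2)) = b0 := by omega
      rw [this]; exact hpreB

-- the dict holds exactly the first index of every pair seen so far
def pvInv (P : List (Char × Char)) (i : Nat) (d : PySem.Dict (Char × Char) Int) : Prop :=
  ∀ p v, d.get? p = some v ↔
    ∃ m : Nat, v = (m : Int) ∧ m < i ∧ P[m]? = some p ∧ ∀ m' < m, P[m']? ≠ some p

lemma pv_first_occ (P : List (Char × Char)) (p : Char × Char) (i : Nat)
    (h : ∃ m, m < i ∧ P[m]? = some p) :
    ∃ m : Nat, m < i ∧ P[m]? = some p ∧ ∀ m' < m, P[m']? ≠ some p := by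
  classical
  obtain ⟨m0, hm0⟩ := h
  have hex : ∃ m, P[m]? = some p := ⟨m0, hm0.2⟩
  refine ⟨Nat.find hex, ?_, Nat.find_spec hex, fun m' hm' => Nat.find_min hex hm'⟩
  have := Nat.find_min' hex hm0.2
  omega

lemma pvBLoop_iff (P : List (Char × Char)) (q : List (Char × Char)) :
    ∀ (i : Nat) (d : PySem.Dict (Char × Char) Int),
      q = P.drop i → pvInv P i d →
      (pvBLoop q (i : Int) d = true ↔
        ∃ a b p, a + 2 ≤ b ∧ i ≤ b ∧ P[a]? = some p ∧ P[b]? = some p) := by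
  induction q with
  | nil =>
    intro i d hq _
    have hlen : P.length ≤ i := by
      have := congrArg List.length hq
      simp [List.length_drop] at this; omega
    simp only [pvBLoop, Bool.false_eq_true, false_iff]
    rintro ⟨a, b, p, -, hib, -, hPb⟩
    have : b < P.length := (List.getElem?_eq_some_iff.mp hPb).1
    omega
  | cons p rest ih =>
    intro i d hq hinv
    have hPi : P[i]? = some p := by
      have : (P.drop i)[0]? = some p := by rw [← hq]; simp
      simpa [List.getElem?_drop] using this
    have hrest : rest = P.drop (i + 1) := by
      have := congrArg List.tail hq
      simpa [List.drop_drop, Nat.add_comm] using this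
    cases hget : d.get? p with
    | some j =>
      simp only [pvBLoop, hget]
      obtain ⟨m, rfl, hmi, hPm, hmin⟩ := (hinv p j).mp hget
      by_cases hgap : 2 ≤ (i : Int) - (m : Int)
      · rw [if_pos hgap]
        exact iff_of_true rfl ⟨m, i, p, by omega, le_refl i, hPm, hPi⟩
      · rw [if_neg hgap]
        have hinv' : pvInv P (i + 1) d := by
          intro p' v
          rw [hinv p' v]
          constructor
          · rintro ⟨m', rfl, hm', hP', hmin'⟩
            exact ⟨m', rfl, by omega, hP', hmin'⟩
          · rintro ⟨m', rfl, hm', hP', hmin'⟩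
            refine ⟨m', rfl, ?_, hP', hmin'⟩
            rcases Nat.lt_succ_iff_lt_or_eq.mp hm' with h | rfl
            · exact h
            · -- m' = i is the first occurrence of p'; but P[i]? = some p and p occurred at m < i
              have : p' = p := by
                have := hP'.symm.trans hPi
                exact (Option.some_injective _ this.symm).symm
              subst this
              exact absurd hPm (hmin' m hmi)
        have hcast : ((i : Int) + 1) = ((i + 1 : Nat) : Int) := by push_cast; ring
        rw [hcast, ih (i + 1) d hrest hinv']
        constructor
        · rintro ⟨a, b, p', hab, hib, hPa, hPb⟩
          exact ⟨a, b, p', hab, by omega, hPa, hPb⟩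
        · rintro ⟨a, b, p', hab, hib, hPa, hPb⟩
          rcases Nat.lt_or_ge b (i + 1) with hb | hb
          · -- b ≤ i, with i ≤ b so b = i: p' = p, a + 2 ≤ i: contradicts gap < 2
            have hbi : b = i := by omega
            subst hbi
            have hp' : p' = p := Option.some_injective _ (hPb.symm.trans hPi)
            subst hp'
            -- first occurrence m ≤ a
            have hma : m ≤ a := by
              by_contra h
              exact hmin a (by omega) hPa
            omega
          · exact ⟨a, b, p', hab, hb, hPa, hPb⟩
    | none =>
      simp only [pvBLoop, hget]
      have hno : ∀ m < i, P[m]? ≠ some p := by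
        intro m hm hPm
        obtain ⟨m0, hm0i, hPm0, hmin0⟩ := pv_first_occ P p i ⟨m, hm, hPm⟩
        have := (hinv p (m0 : Int)).mpr ⟨m0, rfl, hm0i, hPm0, hmin0⟩
        rw [hget] at this; simp at this
      have hinv' : pvInv P (i + 1) (d.insert p (i : Int)) := by
        intro p' v
        by_cases hpp : p' = p
        · subst hpp
          rw [PySem.Dict.get?_insert_self]
          constructor
          · rintro h
            have hv : v = (i : Int) := by injection h with h2; omega
            exact ⟨i, hv, by omega, hPi, hno⟩
          · rintro ⟨m', rfl, hm', hP', hmin'⟩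
            have : m' = i := by
              rcases Nat.lt_succ_iff_lt_or_eq.mp hm' with h | rfl
              · exact absurd hP' (hno m' h)
              · rfl
            subst this; rfl
        · rw [PySem.Dict.get?_insert_of_ne _ _ hpp, hinv p' v]
          constructor
          · rintro ⟨m', rfl, hm', hP', hmin'⟩
            exact ⟨m', rfl, by omega, hP', hmin'⟩
          · rintro ⟨m', rfl, hm', hP', hmin'⟩
            refine ⟨m', rfl, ?_, hP', hmin'⟩
            rcases Nat.lt_succ_iff_lt_or_eq.mp hm' with h | rfl
            · exact h
            · exact absurd (Option.some_injective _ (hP'.symm.trans hPi)) hpp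
      have hcast : ((i : Int) + 1) = ((i + 1 : Nat) : Int) := by push_cast; ring
      rw [hcast, ih (i + 1) _ hrest hinv']
      constructor
      · rintro ⟨a, b, p', hab, hib, hPa, hPb⟩
        exact ⟨a, b, p', hab, by omega, hPa, hPb⟩
      · rintro ⟨a, b, p', hab, hib, hPa, hPb⟩
        rcases Nat.lt_or_ge b (i + 1) with hb | hb
        · have hbi : b = i := by omega
          subst hbi
          have hp' : p' = p := Option.some_injective _ (hPb.symm.trans hPi)
          subst hp'
          exact absurd hPa (hno a (by omega))
        · exact ⟨a, b, p', hab, hb, hPa, hPb⟩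

lemma pv_B_iff (line : String) :
    contains_double_couplet_alt line = true ↔ pvHasRep line.toList := by
  unfold contains_double_couplet_alt
  have h0 : ((0 : Nat) : Int) = (0 : Int) := rfl
  rw [← h0, pvBLoop_iff (line.toList.zip line.toList.tail) _ 0 PySem.Dict.empty (by simp)
    (by intro p v; rw [PySem.Dict.get?_empty]; constructor
        · intro h; simp at h
        · rintro ⟨m, -, hm, -⟩; omega)]
  unfold pvHasRep
  constructor
  · rintro ⟨a, b, p, hab, -, hPa, hPb⟩; exact ⟨a, b, p, hab, hPa, hPb⟩
  · rintro ⟨a, b, p, hab, hPa, hPb⟩; exact ⟨a, b, p, hab, Nat.zero_le b, hPa, hPb⟩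

-- ===== VERDICT (by name: the statement is the Claim_ definition above) =====
theorem contains_double_couplet_spec : Claim_equal_contains_double_couplet := by
  intro line _
  unfold Spec_contains_double_couplet
  exact Bool.eq_iff_iff.mpr ((pv_A_iff line).trans (pv_B_iff line).symm)
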